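-- pv_equiv track=rewrite | github.com/Yuzhe98/Axion-NMR-simulator | src/functioncache.py | merge_peak_bins
-- ===== SOURCE A (Python) =====
-- def merge_peak_bins(vals, threshold):
--     # Sort values and keep track of original indices
--     indexed_values = sorted((value, index) for index, value in enumerate(vals))
--
--     merged_values = []
--     merged_indices = []
--
--     i = 0
--     while i < len(indexed_values):
--         current_value, current_index = indexed_values[i]
--         next_index = i + 1
--         to_merge = [current_value]
--         original_indices = [current_index]
--
--         # Find all values within the threshold
--         while (
--             next_index < len(indexed_values)
--             and indexed_values[next_index][0] - current_value < threshold
--         ):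
--             next_value, next_index_value = indexed_values[next_index]
--             to_merge.append(next_value)
--             original_indices.append(next_index_value)
--             next_index += 1
--
--         # Keep the highest value from the merged values
--         max_value = max(to_merge)
--         merged_values.append(max_value)
--         merged_indices.append(original_indices[to_merge.index(max_value)])
--
--         # Move the index to the next group of values
--         i = next_index
--
--     return merged_values, merged_indices
-- ===== SOURCE B (Python) =====
-- def merge_peak_bins(vals, threshold):
--     # Single-pass state machine over the sorted (value, index) pairs:
--     # no per-group sublists, no max()/ .index() rescans.
--     pairs = sorted((value, index) for index, value in enumerate(vals))
--     if not pairs: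
--         return [], []
--     merged_values = []
--     merged_indices = []
--     start, max_index = pairs[0]
--     max_value = start
--     for value, index in pairs[1:]:
--         if value - start >= threshold:
--             merged_values.append(max_value)
--             merged_indices.append(max_index)
--             start = value
--             max_value = value
--             max_index = index
--         elif value > max_value:
--             max_value = value
--             max_index = index
--     merged_values.append(max_value)
--     merged_indices.append(max_index)
--     return merged_values, merged_indices
-- ===== Notes on version B (the rewrite author's own statement) =====
-- stated objective: simpler
-- what changed: Replaced A's nested while loops that build per-group value/index sublists and then rescan them with max() and .index() by a single for-loop state machine over the sorted pairs that maintains the group's start, running maximum and its first index.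
import Mathlib
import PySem

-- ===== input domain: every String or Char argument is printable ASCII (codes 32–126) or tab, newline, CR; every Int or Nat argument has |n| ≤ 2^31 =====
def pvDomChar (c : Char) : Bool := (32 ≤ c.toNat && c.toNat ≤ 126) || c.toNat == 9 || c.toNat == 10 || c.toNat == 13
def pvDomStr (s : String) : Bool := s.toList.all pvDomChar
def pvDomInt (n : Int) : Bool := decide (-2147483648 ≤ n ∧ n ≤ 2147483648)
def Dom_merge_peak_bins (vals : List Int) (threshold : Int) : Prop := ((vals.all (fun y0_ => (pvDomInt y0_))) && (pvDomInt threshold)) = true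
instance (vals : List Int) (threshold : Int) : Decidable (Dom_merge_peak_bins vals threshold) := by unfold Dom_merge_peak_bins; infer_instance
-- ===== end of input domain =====

-- B replaces A's nested while loops (per-group sublists rescanned by max()/.index()) with a
-- single-pass state machine over the sorted pairs; objective: simpler.


-- ===== PORT A =====
-- inner while loop of A: collect (to_merge tail, original_indices tail, remaining pairs)
def aCollect (current t : Int) : List (Int × Int) → List Int × List Int × List (Int × Int)
  | [] => ([], [], [])
  | (w, j) :: rest =>
    if w - current < t then
      let r := aCollect current t rest
      (w :: r.1, j :: r.2.1, r.2.2)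
    else ([], [], (w, j) :: rest)

-- the remaining suffix is no longer than the input (termination of the outer while)
theorem aCollect_rest_le (current t : Int) (xs : List (Int × Int)) :
    (aCollect current t xs).2.2.length ≤ xs.length := by
  induction xs with
  | nil => simp [aCollect]
  | cons p rest ih =>
    obtain ⟨w, j⟩ := p
    by_cases h : w - current < t <;> simp [aCollect, h] <;> omega

-- outer while loop of A
def aLoop (t : Int) : List (Int × Int) → List Int × List Int
  | [] => ([], [])
  | (v, idx) :: rest =>
    let c := aCollect v t rest
    let to_merge := v :: c.1
    let original_indices := idx :: c.2.1
    let max_value := (PySem.List.max? to_merge (fun y => y)).getD 0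
    let pos := (PySem.List.index? to_merge max_value).getD 0
    let sel := (PySem.List.pyGet? original_indices (pos : Int)).getD 0
    let r := aLoop t c.2.2
    (max_value :: r.1, sel :: r.2)
termination_by xs => xs.length
decreasing_by
  have := aCollect_rest_le v t rest
  simp; omega

def merge_peak_bins (vals : List Int) (threshold : Int) : List Int × List Int :=
  -- sorted((value, index) for index, value in enumerate(vals)): tuple sort, both components
  let indexed_values := PySem.List.sorted2 ((PySem.List.enumerate vals 0).map (fun p => (p.2, p.1))) Prod.fst Prod.snd false
  aLoop threshold indexed_values

-- ===== PORT B =====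
-- the single for-loop state machine of Source B (start, running max value, its index)
def bLoop (t start maxv maxi : Int) : List (Int × Int) → List Int × List Int
  | [] => ([maxv], [maxi])
  | (w, j) :: rest =>
    if t ≤ w - start then
      let r := bLoop t w w j rest
      (maxv :: r.1, maxi :: r.2)
    else if maxv < w then bLoop t start w j rest
    else bLoop t start maxv maxi rest

def bStart (t : Int) : List (Int × Int) → List Int × List Int
  | [] => ([], [])
  | (v, i) :: rest => bLoop t v v i rest

def merge_peak_bins_alt (vals : List Int) (threshold : Int) : List Int × List Int :=
  let pairs := PySem.List.sorted2 ((PySem.List.enumerate vals 0).map (fun p => (p.2, p.1))) Prod.fst Prod.snd false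
  bStart threshold pairs

-- ===== PRECONDITION & SPEC =====
def Spec_merge_peak_bins (vals : List Int) (threshold : Int) (out : List Int × List Int) : Prop := out = merge_peak_bins_alt vals threshold
instance (vals : List Int) (threshold : Int) (out : List Int × List Int) : Decidable (Spec_merge_peak_bins vals threshold out) := by unfold Spec_merge_peak_bins; infer_instance

-- ===== CLAIM (what is proved, stated in full; the proofs are below) =====
def Claim_equal_merge_peak_bins : Prop := ∀ (vals : List Int) (threshold : Int), Dom_merge_peak_bins vals threshold → Spec_merge_peak_bins vals threshold (merge_peak_bins vals threshold)

-- ===== LEMMAS AND PROOFS =====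

-- running maximum with first-occurrence tie break, over (value, index) pairs
def runMax : Int × Int → List (Int × Int) → Int × Int
  | s, [] => s
  | (v, i), (w, j) :: rest => runMax (if v < w then (w, j) else (v, i)) rest

theorem aCollect_len_eq (current t : Int) (xs : List (Int × Int)) :
    (aCollect current t xs).1.length = (aCollect current t xs).2.1.length := by
  induction xs with
  | nil => simp [aCollect]
  | cons p rest ih =>
    obtain ⟨w, j⟩ := p
    by_cases h : w - current < t <;> simp [aCollect, h, ih]

-- A's head-of-group computation (max, then first index of the max) equals the running-max fold
theorem pick_eq (g : List (Int × Int)) (v i : Int) :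
    ((PySem.List.max? (v :: g.map Prod.fst) (fun y => y)).getD 0 = (runMax (v, i) g).1)
    ∧ ((PySem.List.pyGet? (i :: g.map Prod.snd)
         (((PySem.List.index? (v :: g.map Prod.fst)
             ((PySem.List.max? (v :: g.map Prod.fst) (fun y => y)).getD 0)).getD 0 : Nat) : Int)).getD 0
       = (runMax (v, i) g).2) := by
  induction g generalizing v i with
  | nil =>
    refine ⟨?_, ?_⟩ <;>
      simp [PySem.List.max?_id_cons, runMax, PySem.List.index?_cons_self,
        PySem.List.pyGet?_zero_cons]
  | cons p g' ih =>
    obtain ⟨w, j⟩ := p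
    by_cases hvw : v < w
    · -- new running max (w, j); the old head v is strictly below the group max
      obtain ⟨ih1, ih2⟩ := ih w j
      have hmax : (PySem.List.max? (v :: w :: g'.map Prod.fst) (fun y => y))
          = PySem.List.max? (w :: g'.map Prod.fst) (fun y => y) := by
        simp only [PySem.List.max?_id_cons, List.foldl_cons]
        congr 2
        omega
      have hM : ∃ M, PySem.List.max? (w :: g'.map Prod.fst) (fun y => y) = some M := by
        cases h : PySem.List.max? (w :: g'.map Prod.fst) (fun y => y) with
        | none => simp [PySem.List.max?_eq_none_iff] at h
        | some M => exact ⟨M, rfl⟩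
      obtain ⟨M, hMeq⟩ := hM
      have hwM : w ≤ M := PySem.List.max?_isMax hMeq w (by simp)
      have hvM : v ≠ M := by omega
      have hMmem : M ∈ w :: g'.map Prod.fst := PySem.List.max?_mem hMeq
      have hk : ∃ k, PySem.List.index? (w :: g'.map Prod.fst) M = some k := by
        cases h : PySem.List.index? (w :: g'.map Prod.fst) M with
        | none => rw [PySem.List.index?_eq_none_iff] at h; exact absurd hMmem h
        | some k => exact ⟨k, rfl⟩
      obtain ⟨k, hkeq⟩ := hk
      constructor
      · simp only [List.map_cons]
        rw [hmax, hMeq]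
        rw [hMeq] at ih1
        simpa [runMax, hvw] using ih1
      · simp only [List.map_cons]
        rw [hmax, hMeq]
        simp only [Option.getD_some]
        rw [PySem.List.index?_cons_of_ne _ hvM, hkeq]
        simp only [Option.map_some, Option.getD_some]
        rw [show ((k + 1 : Nat) : Int) = ((k : Nat) : Int) + 1 by push_cast; ring]
        rw [PySem.List.pyGet?_cons_succ]
        rw [hMeq] at ih2
        simp only [Option.getD_some] at ih2
        rw [hkeq] at ih2
        simp only [Option.getD_some] at ih2
        simpa [runMax, hvw] using ih2
    · -- w ≤ v: running max unchanged; the collected w never becomes the group max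
      obtain ⟨ih1, ih2⟩ := ih v i
      have hmax : (PySem.List.max? (v :: w :: g'.map Prod.fst) (fun y => y))
          = PySem.List.max? (v :: g'.map Prod.fst) (fun y => y) := by
        simp only [PySem.List.max?_id_cons, List.foldl_cons]
        congr 2
        omega
      have hM : ∃ M, PySem.List.max? (v :: g'.map Prod.fst) (fun y => y) = some M := by
        cases h : PySem.List.max? (v :: g'.map Prod.fst) (fun y => y) with
        | none => simp [PySem.List.max?_eq_none_iff] at h
        | some M => exact ⟨M, rfl⟩
      obtain ⟨M, hMeq⟩ := hM
      have hvM : v ≤ M := PySem.List.max?_isMax hMeq v (by simp)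
      constructor
      · simp only [List.map_cons]
        rw [hmax, hMeq]
        rw [hMeq] at ih1
        simpa [runMax, hvw] using ih1
      · simp only [List.map_cons]
        rw [hmax, hMeq]
        simp only [Option.getD_some]
        rw [hMeq] at ih2
        simp only [Option.getD_some] at ih2
        by_cases hveq : v = M
        · subst hveq
          rw [PySem.List.index?_cons_self] at ih2 ⊢
          simpa [runMax, hvw, PySem.List.pyGet?_zero_cons] using ih2
        · have hwM : w ≠ M := by omega
          have hMmem : M ∈ v :: g'.map Prod.fst := PySem.List.max?_mem hMeq
          have hMmem' : M ∈ g'.map Prod.fst := by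
            cases hMmem with
            | head => exact absurd rfl hveq
            | tail _ h => exact h
          have hk : ∃ k, PySem.List.index? (g'.map Prod.fst) M = some k := by
            cases h : PySem.List.index? (g'.map Prod.fst) M with
            | none => rw [PySem.List.index?_eq_none_iff] at h; exact absurd hMmem' h
            | some k => exact ⟨k, rfl⟩
          obtain ⟨k, hkeq⟩ := hk
          rw [PySem.List.index?_cons_of_ne _ hveq, PySem.List.index?_cons_of_ne _ hwM, hkeq]
          rw [PySem.List.index?_cons_of_ne _ hveq, hkeq] at ih2
          simp only [Option.map_some, Option.getD_some] at ih2 ⊢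
          rw [show ((k + 1 + 1 : Nat) : Int) = ((k + 1 : Nat) : Int) + 1 by push_cast; ring,
            PySem.List.pyGet?_cons_succ]
          rw [show ((k + 1 : Nat) : Int) = ((k : Nat) : Int) + 1 by push_cast; ring,
            PySem.List.pyGet?_cons_succ] at ih2 ⊢
          simpa [runMax, hvw] using ih2

-- B's loop, characterised by A's inner collection and the running-max fold
theorem bLoop_eq (xs : List (Int × Int)) (t start maxv maxi : Int) :
    bLoop t start maxv maxi xs =
      ((runMax (maxv, maxi) ((aCollect start t xs).1.zip (aCollect start t xs).2.1)).1
          :: (bStart t (aCollect start t xs).2.2).1,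
       (runMax (maxv, maxi) ((aCollect start t xs).1.zip (aCollect start t xs).2.1)).2
          :: (bStart t (aCollect start t xs).2.2).2) := by
  induction xs generalizing maxv maxi start with
  | nil => simp [bLoop, aCollect, runMax, bStart]
  | cons p rest ih =>
    obtain ⟨w, j⟩ := p
    by_cases h : w - start < t
    · have h' : ¬ t ≤ w - start := by omega
      by_cases hm : maxv < w
      · simpa [bLoop, aCollect, h, h', hm, runMax] using ih start w j
      · simpa [bLoop, aCollect, h, h', hm, runMax] using ih start maxv maxi
    · have h' : t ≤ w - start := by omega
      simp [bLoop, aCollect, h, h', runMax, bStart]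

-- zip-projection bridge: aCollect's two lists are the projections of their zip
theorem zip_proj (l1 : List Int) (l2 : List Int) (h : l1.length = l2.length) :
    (l1.zip l2).map Prod.fst = l1 ∧ (l1.zip l2).map Prod.snd = l2 := by
  constructor
  · exact List.map_fst_zip (by omega)
  · exact List.map_snd_zip (by omega)

theorem aLoop_eq_bStart (n : Nat) (xs : List (Int × Int)) (t : Int) (hn : xs.length ≤ n) :
    aLoop t xs = bStart t xs := by
  induction n generalizing xs with
  | zero =>
    have : xs = [] := by cases xs <;> simp_all
    subst this
    simp [aLoop, bStart]
  | succ n ih =>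
    cases xs with
    | nil => simp [aLoop, bStart]
    | cons p rest =>
      obtain ⟨v, i⟩ := p
      have hlen := aCollect_len_eq v t rest
      obtain ⟨hz1, hz2⟩ := zip_proj (aCollect v t rest).1 (aCollect v t rest).2.1 hlen
      have hrec : aLoop t (aCollect v t rest).2.2 = bStart t (aCollect v t rest).2.2 := by
        apply ih
        have := aCollect_rest_le v t rest
        simp at hn
        omega
      have hpick := pick_eq ((aCollect v t rest).1.zip (aCollect v t rest).2.1) v i
      rw [hz1, hz2] at hpick
      show aLoop t ((v, i) :: rest) = bLoop t v v i rest
      rw [bLoop_eq rest t v v i]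
      rw [aLoop]
      simp only at *
      rw [hrec, hpick.2, hpick.1]

-- ===== VERDICT (by name: the statement is the Claim_ definition above) =====
theorem merge_peak_bins_spec : Claim_equal_merge_peak_bins := by
  intro vals threshold _
  unfold Spec_merge_peak_bins merge_peak_bins merge_peak_bins_alt
  exact aLoop_eq_bStart _ _ threshold (Nat.le_refl _)
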